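-- pv_equiv track=rewrite | github.com/tmone/sm-hrms | processing/improved_person_extraction.py | _group_detections_by_person
-- ===== SOURCE A (Python) =====
-- from typing import Dict, List, Tuple, Optional
-- from collections import defaultdict
--
-- def _group_detections_by_person(detections: List[Dict]) -> Dict[str, List[Dict]]:
--     """Group detections by person ID."""
--     persons_data = defaultdict(list)
--
--     for det in detections:
--         person_id = f"PERSON-{det['person_id']:04d}"
--         persons_data[person_id].append(det)
--
--     # Sort detections by frame number
--     for person_id in persons_data:
--         persons_data[person_id].sort(key=lambda x: x['frame_number'])
--
--     return dict(persons_data)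
-- ===== SOURCE B (Python) =====
-- def _group_detections_by_person(detections):
--     """Group detections by person ID: dedup keys first, then per-key filter + sort."""
--     keys = dict.fromkeys(f"PERSON-{d['person_id']:04d}" for d in detections)
--     return {k: sorted((d for d in detections if f"PERSON-{d['person_id']:04d}" == k),
--                       key=lambda x: x['frame_number'])
--             for k in keys}
-- ===== Notes on version B (the rewrite author's own statement) =====
-- stated objective: simpler
-- what changed: A builds per-person buckets in one pass over the detections and then sorts each bucket; B first dedups the keys in first-occurrence order and then, key by key, filters the detection list for that key and sorts the filtered sublist, removing the bucket dict entirely.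
import Mathlib
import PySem

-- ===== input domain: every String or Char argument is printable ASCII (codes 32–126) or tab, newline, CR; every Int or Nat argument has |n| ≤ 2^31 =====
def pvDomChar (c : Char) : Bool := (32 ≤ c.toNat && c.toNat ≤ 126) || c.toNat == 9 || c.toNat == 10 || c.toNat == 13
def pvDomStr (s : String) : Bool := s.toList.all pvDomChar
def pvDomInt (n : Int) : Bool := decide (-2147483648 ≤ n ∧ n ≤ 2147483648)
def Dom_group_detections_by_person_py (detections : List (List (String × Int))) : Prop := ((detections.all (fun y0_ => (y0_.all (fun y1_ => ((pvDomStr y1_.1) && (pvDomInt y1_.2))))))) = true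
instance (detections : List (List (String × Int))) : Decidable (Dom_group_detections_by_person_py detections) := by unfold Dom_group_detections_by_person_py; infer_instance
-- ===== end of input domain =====

-- B dedups the keys in first-occurrence order and builds each group by filtering the detection
-- list for that key and sorting the filtered sublist (no bucket dict); same result, proved equal.


-- ===== PORT A =====
-- f"PERSON-{n:04d}" = "PERSON-" + str(n).zfill(4) for every int (PySem.Chars.zfill is exact);
-- det['person_id'] is an assoc-list lookup: none = KeyError, excluded by Pre_ (the .getD 0 is never reached there)
def pvPersonKey (det : List (String × Int)) : String :=
  String.ofList ("PERSON-".toList ++ PySem.Chars.zfill (PySem.Int.toChars (((PySem.Dict.mk det).get? "person_id").getD 0)) 4)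

-- x['frame_number']: none = KeyError, excluded by Pre_
def pvFrame (det : List (String × Int)) : Int :=
  ((PySem.Dict.mk det).get? "frame_number").getD 0

-- A: defaultdict(list) bucket loop, then sort each bucket by frame_number, return dict(persons_data)
def group_detections_by_person_py (detections : List (List (String × Int))) : List (String × List (List (String × Int))) :=
  let persons := detections.foldl
    (fun d det => PySem.Dict.modify d (pvPersonKey det) [] (fun l => l ++ [det]))
    PySem.Dict.empty
  persons.items.map (fun p => (p.1, PySem.List.sorted p.2 pvFrame false))

-- ===== PORT B =====
-- B: keys = dict.fromkeys(key(d) for d in detections)  (a set in first-occurrence order),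
-- then {k: sorted((d for d in detections if key(d) == k), key=frame_number) for k in keys}
def group_detections_by_person_py_alt (detections : List (List (String × Int))) : List (String × List (List (String × Int))) :=
  let keys := PySem.Set.ofList (detections.map pvPersonKey)
  keys.map (fun k =>
    (k, PySem.List.sorted (detections.filter (fun d => pvPersonKey d == k)) pvFrame false))

-- ===== PRECONDITION & SPEC =====
-- Pre_ excludes exactly the inputs where Python A raises KeyError: a detection missing the
-- 'person_id' or the 'frame_number' key.
def Pre_group_detections_by_person_py (detections : List (List (String × Int))) : Prop :=
  (detections.all (fun det => (PySem.Dict.mk det).contains "person_id" && (PySem.Dict.mk det).contains "frame_number")) = true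
instance (detections : List (List (String × Int))) : Decidable (Pre_group_detections_by_person_py detections) := by unfold Pre_group_detections_by_person_py; infer_instance

def pvWitness_group_detections_by_person_py : (List (List (String × Int))) :=
  [[("person_id", 1), ("frame_number", 7)], [("person_id", 1), ("frame_number", 3)]]

def Spec_group_detections_by_person_py (detections : List (List (String × Int))) (out : List (String × List (List (String × Int)))) : Prop := out = group_detections_by_person_py_alt detections
instance (detections : List (List (String × Int))) (out : List (String × List (List (String × Int)))) : Decidable (Spec_group_detections_by_person_py detections out) := by unfold Spec_group_detections_by_person_py; infer_instance

-- ===== CLAIM (what is proved, stated in full; the proofs are below) =====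
def Claim_equal_group_detections_by_person_py : Prop := ∀ (detections : List (List (String × Int))), Dom_group_detections_by_person_py detections → Pre_group_detections_by_person_py detections → Spec_group_detections_by_person_py detections (group_detections_by_person_py detections)

-- ===== LEMMAS AND PROOFS =====

-- a bucket-append loop keyed by pvPersonKey, characterised: bucket contents and key set
lemma pv_modify_fold_getD (l : List (List (String × Int)))
    (d : PySem.Dict String (List (List (String × Int)))) (c : String) :
    (l.foldl (fun d det => PySem.Dict.modify d (pvPersonKey det) [] (fun v => v ++ [det])) d).getD c []
      = d.getD c [] ++ l.filter (fun det => pvPersonKey det == c) := by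
  have h := PySem.Dict.getD_foldl_modify_append (l := l.map (fun det => (pvPersonKey det, det))) (d := d) (c := c)
  rw [List.foldl_map] at h
  simpa [List.filter_map, Function.comp_def] using h

-- characterisation of A's bucket dict (from empty)
lemma pv_itemsA (detections : List (List (String × Int))) :
    (detections.foldl (fun d det => PySem.Dict.modify d (pvPersonKey det) [] (fun v => v ++ [det])) PySem.Dict.empty).items
      = (PySem.Set.ofList (detections.map pvPersonKey)).map
          (fun k => (k, detections.filter (fun det => pvPersonKey det == k))) := by
  have hnd : (detections.foldl (fun d det => PySem.Dict.modify d (pvPersonKey det) [] (fun v => v ++ [det])) PySem.Dict.empty).keys.Nodup :=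
    PySem.Dict.nodup_keys_foldl_modify_key _ _ _ _ _ (by simp [PySem.Dict.empty, PySem.Dict.keys])
  rw [PySem.Dict.items_eq_map_keys _ hnd [],
    PySem.Dict.keys_foldl_modify_key detections pvPersonKey [] (fun _ det v => v ++ [det])]
  have hk : PySem.Set.update (PySem.Dict.empty : PySem.Dict String (List (List (String × Int)))).keys (detections.map pvPersonKey)
      = PySem.Set.ofList (detections.map pvPersonKey) := rfl
  rw [hk]
  refine List.map_congr_left (fun k _ => ?_)
  rw [pv_modify_fold_getD]
  simp [PySem.Dict.empty, PySem.Dict.getD, PySem.Dict.get?]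

-- ===== VERDICT (by name: the statement is the Claim_ definition above) =====
theorem group_detections_by_person_py_spec : Claim_equal_group_detections_by_person_py := by
  intro detections _ _
  unfold Spec_group_detections_by_person_py
  simp only [group_detections_by_person_py, group_detections_by_person_py_alt, pv_itemsA,
    List.map_map]
  rfl
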